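-- pv_equiv track=rewrite | github.com/Jonathan-Peh/LeetCode | code/5. Longest Palindrome Substring.py | longestFromNucleus
-- ===== SOURCE A (Python) =====
-- def longestFromNucleus(s,left,right):
--     while left >= 0 and right < len(s):
--         if s[left] == s[right]:
--             left -= 1
--             right += 1
--         else:
--             return s[left+1:right]
--     return s[left+1:right]
-- ===== SOURCE B (Python) =====
-- def longestFromNucleus(s, left, right):
--     # Reframe expand-around-center as: longest common prefix of the reversed
--     # prefix ending at `left` and the suffix starting at `right`.
--     la = s[:left + 1][::-1] if left >= 0 else ''
--     ra = s[right:]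
--     k = 0
--     for a, b in zip(la, ra):
--         if a != b:
--             break
--         k += 1
--     return s[left - k + 1 : right + k]
-- ===== Notes on version B (the rewrite author's own statement) =====
-- stated objective: alternative
-- what changed: Replaces A's in-place two-pointer inward/outward while-loop by a non-mutating decomposition: build the reversed prefix ending at left and the suffix starting at right, count their common prefix length k with one zip scan, and return the slice s[left-k+1:right+k]. Pre_ excludes inputs where the while-loop would index with a negative right or an out-of-range left: there A either raises IndexError or returns a value produced by Python's negative-index wraparound, an unspecified corner for this palindrome helper.
-- outside the precondition, e.g. on longestFromNucleus('aaaa', 2, -1): A returns 'aa', B returns ''; on longestFromNucleus('ab', 5, 1): A raises IndexError, B returns ''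
import Mathlib
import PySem

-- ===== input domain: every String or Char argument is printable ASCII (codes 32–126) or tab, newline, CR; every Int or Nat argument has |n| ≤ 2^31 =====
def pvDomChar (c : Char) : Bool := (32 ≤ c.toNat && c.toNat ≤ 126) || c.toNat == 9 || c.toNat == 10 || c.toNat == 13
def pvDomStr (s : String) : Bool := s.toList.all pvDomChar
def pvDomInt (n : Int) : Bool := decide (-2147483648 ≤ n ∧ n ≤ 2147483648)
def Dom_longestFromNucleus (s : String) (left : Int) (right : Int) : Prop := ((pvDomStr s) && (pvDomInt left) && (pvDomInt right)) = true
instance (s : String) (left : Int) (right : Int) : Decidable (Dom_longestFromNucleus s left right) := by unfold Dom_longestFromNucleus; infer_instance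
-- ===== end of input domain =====

-- B re-derives the expand-around-center result as the common-prefix length of the
-- reversed prefix ending at `left` and the suffix starting at `right` (alternative
-- decomposition, same cost).


-- ===== PORT A =====
-- A's while-loop, step for step on the code points; where Python raises IndexError
-- (pyGet? = none, outside Pre_) the port returns [].
def pvLoopA (cs : List Char) (left : Int) (right : Int) : List Char :=
  if h : 0 ≤ left ∧ right < (cs.length : Int) then
    match PySem.List.pyGet? cs left, PySem.List.pyGet? cs right with
    | some a, some b =>
        if a = b then pvLoopA cs (left - 1) (right + 1)
        else PySem.List.slice cs (some (left + 1)) (some right)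
    | _, _ => []
  else PySem.List.slice cs (some (left + 1)) (some right)
termination_by (left + 1).toNat
decreasing_by omega

def longestFromNucleus (s : String) (left : Int) (right : Int) : String :=
  String.ofList (pvLoopA s.toList left right)

-- ===== PORT B =====
-- Source B's zip loop: length of the common prefix, stopping at the first mismatch.
def pvCpl : List Char → List Char → Nat
  | a :: as, b :: bs => if a = b then pvCpl as bs + 1 else 0
  | _, _ => 0

def longestFromNucleus_alt (s : String) (left : Int) (right : Int) : String :=
  let cs := s.toList
  let la := if 0 ≤ left then (PySem.List.slice cs none (some (left + 1))).reverse else []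
  let ra := PySem.List.slice cs (some right) none
  let k : Int := (pvCpl la ra : Int)
  String.ofList (PySem.List.slice cs (some (left - k + 1)) (some (right + k)))

-- ===== PRECONDITION & SPEC =====
-- Pre_ excludes inputs where the while-loop would index with a negative right or an
-- out-of-range left: there A either raises IndexError or returns a value produced by
-- Python's negative-index wraparound, an unspecified corner for this palindrome helper.
def Pre_longestFromNucleus (s : String) (left : Int) (right : Int) : Prop :=
  left < 0 ∨ (s.toList.length : Int) ≤ right ∨ (left < (s.toList.length : Int) ∧ 0 ≤ right)
instance (s : String) (left : Int) (right : Int) : Decidable (Pre_longestFromNucleus s left right) := by unfold Pre_longestFromNucleus; infer_instance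

def pvWitness_longestFromNucleus : String × Int × Int := ("abacaba", 3, 3)

def Spec_longestFromNucleus (s : String) (left : Int) (right : Int) (out : String) : Prop := out = longestFromNucleus_alt s left right
instance (s : String) (left : Int) (right : Int) (out : String) : Decidable (Spec_longestFromNucleus s left right out) := by unfold Spec_longestFromNucleus; infer_instance

-- ===== CLAIM (what is proved, stated in full; the proofs are below) =====
def Claim_equal_longestFromNucleus : Prop := ∀ (s : String) (left : Int) (right : Int), Dom_longestFromNucleus s left right → Pre_longestFromNucleus s left right → Spec_longestFromNucleus s left right (longestFromNucleus s left right)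

-- ===== LEMMAS AND PROOFS =====

-- the common-prefix count B computes, expressed with take/drop
def pvK (cs : List Char) (left right : Int) : Nat :=
  pvCpl ((cs.take (left + 1).toNat).reverse) (cs.drop right.toNat)

theorem pvCpl_nil_right (xs : List Char) : pvCpl xs [] = 0 := by
  cases xs <;> rfl

-- Main loop invariant: within the in-range band, A's loop returns exactly
-- the slice s[left-k+1 : right+k] for k = pvK.
theorem pvLoopA_eq (cs : List Char) (l r : Int)
    (hl0 : -1 ≤ l) (hln : l < (cs.length : Int)) (hr0 : 0 ≤ r) (hrn : r ≤ (cs.length : Int)) :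
    pvLoopA cs l r
      = PySem.List.slice cs (some (l - (pvK cs l r : Int) + 1)) (some (r + (pvK cs l r : Int))) := by
  generalize hm : (l + 1).toNat = m
  induction m generalizing l r with
  | zero =>
    rw [pvLoopA, dif_neg (by omega)]
    have hk : pvK cs l r = 0 := by
      have h0 : (l + 1).toNat = 0 := hm
      simp [pvK, h0, pvCpl]
    rw [hk]; norm_num
  | succ m ih =>
    rw [pvLoopA]
    by_cases hcond : 0 ≤ l ∧ r < (cs.length : Int)
    · rw [dif_pos hcond]
      have hltn : l.toNat < cs.length := by omega
      have hrtn : r.toNat < cs.length := by omega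
      rw [PySem.List.pyGet?_eq_some_getElem cs hcond.1 hln,
          PySem.List.pyGet?_eq_some_getElem cs hr0 hcond.2]
      have htake : cs.take (l.toNat + 1) = cs.take l.toNat ++ [cs[l.toNat]] := by
        rw [List.take_add_one]
        simp [List.getElem?_eq_getElem hltn]
      have hdrop : cs.drop r.toNat = cs[r.toNat] :: cs.drop (r.toNat + 1) :=
        List.drop_eq_getElem_cons hrtn
      have hK : pvK cs l r
          = if cs[l.toNat] = cs[r.toNat] then pvK cs (l - 1) (r + 1) + 1 else 0 := by
        have h1 : (l - 1 + 1).toNat = l.toNat := by omega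
        have h2 : (r + 1).toNat = r.toNat + 1 := by omega
        have h3 : (l + 1).toNat = l.toNat + 1 := by omega
        rw [pvK, pvK, h1, h2, h3, htake, hdrop]
        simp only [List.reverse_append, List.reverse_cons, List.reverse_nil,
          List.nil_append, List.singleton_append, pvCpl]
      show (if cs[l.toNat] = cs[r.toNat] then pvLoopA cs (l - 1) (r + 1)
            else PySem.List.slice cs (some (l + 1)) (some r)) = _
      by_cases heq : cs[l.toNat] = cs[r.toNat]
      · rw [if_pos heq,
           ih (l - 1) (r + 1) (by omega) (by omega) (by omega) (by omega) (by omega),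
           hK, if_pos heq]
        congr 2 <;> push_cast <;> ring
      · rw [if_neg heq, hK, if_neg heq]; norm_num
    · rw [dif_neg hcond]
      have hk : pvK cs l r = 0 := by
        rcases not_and_or.mp hcond with h | h
        · have h0 : (l + 1).toNat = 0 := by omega
          simp [pvK, h0, pvCpl]
        · have h0 : cs.length ≤ r.toNat := by omega
          rw [pvK, List.drop_eq_nil_of_le h0, pvCpl_nil_right]
      rw [hk]; norm_num

theorem pvCpl_nil_left (xs : List Char) : pvCpl [] xs = 0 := by
  cases xs <;> rfl

-- ===== VERDICT (by name: the statement is the Claim_ definition above) =====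
theorem longestFromNucleus_spec : Claim_equal_longestFromNucleus := by
  intro s l r _hd hpre
  unfold Spec_longestFromNucleus longestFromNucleus longestFromNucleus_alt
  by_cases hl : 0 ≤ l
  · by_cases hr : r < (s.toList.length : Int)
    · have hln : l < (s.toList.length : Int) ∧ 0 ≤ r := by
        rcases hpre with h | h | h
        · omega
        · omega
        · exact h
      rw [pvLoopA_eq s.toList l r (by omega) hln.1 hln.2 (by omega)]
      simp only [if_pos hl, PySem.List.slice_to s.toList (show (0:Int) ≤ l + 1 by omega),
        PySem.List.slice_from s.toList hln.2]
      unfold pvK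
      rfl
    · -- right ≥ len(s): the loop never runs and B's suffix is empty
      rw [pvLoopA, dif_neg (by omega)]
      simp only [if_pos hl, PySem.List.slice_from s.toList (show (0:Int) ≤ r by omega),
        List.drop_eq_nil_of_le (show s.toList.length ≤ r.toNat by omega), pvCpl_nil_right]
      norm_num
  · -- left < 0: the loop never runs and B's reversed prefix is empty
    rw [pvLoopA, dif_neg (by omega)]
    simp only [if_neg hl, pvCpl_nil_left]
    norm_num
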